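-- pv_equiv track=rewrite | github.com/Jungilgyu/algorithm | 프로그래머스/3/84021. 퍼즐 조각 채우기/퍼즐 조각 채우기.py | check
-- ===== SOURCE A (Python) =====
-- def normalize(shape):
--     shape.sort(key=lambda x: (x[0], x[1]))
--     si, sj = shape[0]
--     return [[i - si, j - sj] for i, j in shape]
--
-- def rotate(block):
--     rotated = [[y, -x] for x, y in block]
--     return normalize(rotated)
--
-- def check(block, cb, used):
--     cb_norm = normalize(cb)
--     temp = block
--     for _ in range(4):
--         temp = rotate(temp)
--         if temp == cb_norm:
--             return True
--     return False
-- ===== SOURCE B (Python) =====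
-- def canonical(shape):
--     # lexicographically least of the four normalized rotations of the shape
--     forms = []
--     cur = shape
--     for _ in range(4):
--         rotated = sorted(([y, -x] for x, y in cur), key=lambda p: (p[0], p[1]))
--         oi, oj = rotated[0]
--         cur = [[i - oi, j - oj] for i, j in rotated]
--         forms.append(cur)
--     return min(forms)
--
-- def check(block, cb, used):
--     cb.sort(key=lambda p: (p[0], p[1]))  # keep A's observable in-place sort of cb
--     return canonical(block) == canonical(cb)
-- ===== Notes on version B (the rewrite author's own statement) =====
-- stated objective: alternative
-- what changed: Replaces A's one-sided scan (rotate block up to 4 times, early-return on match with normalized cb) by a two-sided canonicalization: each shape is mapped to the lexicographic minimum of its four normalized rotations and the two canonical forms are compared for equality.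
import Mathlib
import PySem

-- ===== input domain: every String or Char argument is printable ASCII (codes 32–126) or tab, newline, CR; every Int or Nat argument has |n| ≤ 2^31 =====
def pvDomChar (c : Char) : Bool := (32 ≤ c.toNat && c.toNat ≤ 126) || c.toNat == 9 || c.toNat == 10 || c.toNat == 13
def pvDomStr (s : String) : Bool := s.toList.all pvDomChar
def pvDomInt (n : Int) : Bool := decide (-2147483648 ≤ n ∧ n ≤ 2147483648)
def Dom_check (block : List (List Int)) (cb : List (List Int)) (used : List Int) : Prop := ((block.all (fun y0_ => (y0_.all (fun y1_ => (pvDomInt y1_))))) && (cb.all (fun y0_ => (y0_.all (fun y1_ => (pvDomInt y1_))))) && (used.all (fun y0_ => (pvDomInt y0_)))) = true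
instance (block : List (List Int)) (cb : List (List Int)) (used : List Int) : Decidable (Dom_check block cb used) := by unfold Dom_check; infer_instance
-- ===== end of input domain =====

-- B replaces A's one-sided rotate-and-compare scan by comparing canonical forms (lexicographic
-- minimum of the four normalized rotations) of both shapes; A sorts `cb` in place (B's Python
-- reproduces that mutation); equivalence proved is about the return value.

-- ===== PORT A =====
-- row indexing r[0] / r[1]: ported with pyGetD (defaults 0 / []); exact on Pre_check, where
-- every row has length exactly 2 and the shapes are nonempty (elsewhere Python raises)
def pvG0 (r : List Int) : Int := PySem.List.pyGetD r 0 0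
def pvG1 (r : List Int) : Int := PySem.List.pyGetD r 1 0

def normalizeA (shape : List (List Int)) : List (List Int) :=
  let s := PySem.List.sorted2 shape pvG0 pvG1
  let h := PySem.List.pyGetD s 0 []
  s.map (fun r => [pvG0 r - pvG0 h, pvG1 r - pvG1 h])

def rotateA (block : List (List Int)) : List (List Int) :=
  normalizeA (block.map (fun r => [pvG1 r, -(pvG0 r)]))

def checkLoop : Nat → List (List Int) → List (List Int) → Bool
  | 0, _, _ => false
  | n+1, temp, cbn =>
      let t := rotateA temp
      if t = cbn then true else checkLoop n t cbn

def check (block : List (List Int)) (cb : List (List Int)) (used : List Int) : Bool :=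
  checkLoop 4 block (normalizeA cb)

-- ===== PORT B =====
-- one loop iteration of Source B's canonical(): rotate, sort, translate to the origin
def stepB (cur : List (List Int)) : List (List Int) :=
  let rotated := PySem.List.sorted2 (cur.map (fun p => [pvG1 p, -(pvG0 p)])) pvG0 pvG1
  let o := PySem.List.pyGetD rotated 0 []
  rotated.map (fun r => [pvG0 r - pvG0 o, pvG1 r - pvG1 o])

def canonLoop : Nat → List (List Int) → List (List (List Int)) → List (List (List Int))
  | 0, _, forms => forms
  | n+1, cur, forms => let c := stepB cur; canonLoop n c (forms ++ [c])

-- min(forms) over the nonempty list of four forms; Python's min on lists of lists is the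
-- lexicographic minimum, ported by hand as a fold with Lean's lexicographic `<` (exact)
def canonicalB (shape : List (List Int)) : List (List Int) :=
  match canonLoop 4 shape [] with
  | [] => []
  | f :: fs => fs.foldl (fun a b => if b < a then b else a) f

def check_alt (block : List (List Int)) (cb : List (List Int)) (used : List Int) : Bool :=
  let cbs := PySem.List.sorted2 cb pvG0 pvG1  -- cb.sort(key=…) (in-place in Python)
  decide (canonicalB block = canonicalB cbs)

-- ===== PRECONDITION & SPEC =====
-- Pre_check holds exactly where Python A returns: both shapes nonempty and every row of
-- length exactly 2 (otherwise A raises IndexError/ValueError while sorting or unpacking rows)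
def Pre_check (block : List (List Int)) (cb : List (List Int)) (used : List Int) : Prop :=
  block ≠ [] ∧ cb ≠ [] ∧ (∀ r ∈ block, r.length = 2) ∧ (∀ r ∈ cb, r.length = 2)
instance (block : List (List Int)) (cb : List (List Int)) (used : List Int) : Decidable (Pre_check block cb used) := by unfold Pre_check; infer_instance

def pvWitness_check : List (List Int) × List (List Int) × List Int :=
  ([[0, 0], [0, 1]], [[1, 1], [1, 2]], [])

def Spec_check (block : List (List Int)) (cb : List (List Int)) (used : List Int) (out : Bool) : Prop := out = check_alt block cb used
instance (block : List (List Int)) (cb : List (List Int)) (used : List Int) (out : Bool) : Decidable (Spec_check block cb used out) := by unfold Spec_check; infer_instance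

-- ===== CLAIM (what is proved, stated in full; the proofs are below) =====
def Claim_equal_check : Prop := ∀ (block : List (List Int)) (cb : List (List Int)) (used : List Int), Dom_check block cb used → Pre_check block cb used → Spec_check block cb used (check block cb used)

-- ===== LEMMAS AND PROOFS =====

-- pair level: shapes as lists of integer points
def pvRotP (p : Int × Int) : Int × Int := (p.2, -p.1)
def pvTr (u v : Int) (p : Int × Int) : Int × Int := (p.1 + u, p.2 + v)
def pvEmb (l : List (Int × Int)) : List (List Int) := l.map (fun p => [p.1, p.2])
def pvPi (s : List (List Int)) : List (Int × Int) := s.map (fun r => (pvG0 r, pvG1 r))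
def pvKey (p : Int × Int) : Int ×ₗ Int := toLex p
def pvSortP (l : List (Int × Int)) : List (Int × Int) := PySem.List.sorted l pvKey
def pvNormP (l : List (Int × Int)) : List (Int × Int) :=
  let s := pvSortP l
  let h := s.headI
  s.map (fun p => (p.1 - h.1, p.2 - h.2))
def pvStepP (l : List (Int × Int)) : List (Int × Int) := pvNormP (l.map pvRotP)

lemma pv_before_eq {α : Type} (k1 k2 : α → Int) (a b : α) :
    (decide ((toLex (k1 a, k2 a) : Int ×ₗ Int) < toLex (k1 b, k2 b)))
      = (decide (k1 a < k1 b) || (!decide (k1 b < k1 a) && decide (k2 a < k2 b))) := by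
  by_cases h1 : k1 a < k1 b <;> by_cases h2 : k1 b < k1 a <;> by_cases h3 : k2 a < k2 b <;>
    simp [h1, h2, h3, Prod.Lex.lt_iff] <;> omega

lemma pv_sorted2_eq {α : Type} (xs : List α) (k1 k2 : α → Int) :
    PySem.List.sorted2 xs k1 k2 = PySem.List.sorted xs (fun x => (toLex (k1 x, k2 x) : Int ×ₗ Int)) := by
  have h : (fun (a b : α) => decide (k1 a < k1 b) || (!decide (k1 b < k1 a) && decide (k2 a < k2 b)))
      = (fun a b => decide ((toLex (k1 a, k2 a) : Int ×ₗ Int) < toLex (k1 b, k2 b))) := by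
    funext a b
    exact (pv_before_eq k1 k2 a b).symm
  show List.foldl (fun acc x => PySem.List.insertBy (fun a b => decide (k1 a < k1 b) || (!decide (k1 b < k1 a) && decide (k2 a < k2 b))) x acc) [] xs
      = List.foldl (fun acc x => PySem.List.insertBy (fun a b => decide ((toLex (k1 a, k2 a) : Int ×ₗ Int) < toLex (k1 b, k2 b))) x acc) [] xs
  rw [h]

lemma pv_insertBy_map {α β : Type} (f : α → β) (B : β → β → Bool) (x : α) (ys : List α) :
    PySem.List.insertBy B (f x) (ys.map f)
      = (PySem.List.insertBy (fun a c => B (f a) (f c)) x ys).map f := by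
  induction ys with
  | nil => rfl
  | cons y t ih =>
      simp only [List.map_cons, PySem.List.insertBy]
      split <;> simp_all

lemma pv_foldl_insert_map {α β : Type} (f : α → β) (B : β → β → Bool) (xs : List α) (acc : List α) :
    (xs.map f).foldl (fun a x => PySem.List.insertBy B x a) (acc.map f)
      = (xs.foldl (fun a x => PySem.List.insertBy (fun p q => B (f p) (f q)) x a) acc).map f := by
  induction xs generalizing acc with
  | nil => rfl
  | cons x t ih =>
      simp only [List.map_cons, List.foldl_cons, pv_insertBy_map]
      exact ih _

lemma pv_sorted_map {α β κ : Type} [LT κ] [DecidableLT κ] (f : α → β) (key : β → κ) (xs : List α) :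
    PySem.List.sorted (xs.map f) key = (PySem.List.sorted xs (fun x => key (f x))).map f := by
  show (xs.map f).foldl _ (([] : List α).map f) = _
  exact pv_foldl_insert_map f _ xs []

lemma pvG0_pair (a b : Int) : pvG0 [a, b] = a := by
  simp [pvG0, PySem.List.pyGetD, PySem.List.pyGet?, PySem.List.pyIdx?]

lemma pvG1_pair (a b : Int) : pvG1 [a, b] = b := by
  simp [pvG1, PySem.List.pyGetD, PySem.List.pyGet?, PySem.List.pyIdx?]

lemma pv_emb_sorted2 (l : List (Int × Int)) :
    PySem.List.sorted2 (pvEmb l) pvG0 pvG1 = pvEmb (pvSortP l) := by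
  rw [pv_sorted2_eq, pvEmb, pv_sorted_map]
  have hk : ∀ p : Int × Int, (toLex (pvG0 [p.1, p.2], pvG1 [p.1, p.2]) : Int ×ₗ Int) = pvKey p := by
    intro p
    simp [pvG0_pair, pvG1_pair, pvKey]
  simp only [hk]
  rfl

lemma pv_emb_inj : Function.Injective pvEmb := by
  apply List.map_injective_iff.2
  intro p q h
  simpa [Prod.ext_iff] using h

@[simp] lemma pv_emb_eq_iff (l m : List (Int × Int)) : pvEmb l = pvEmb m ↔ l = m :=
  pv_emb_inj.eq_iff

lemma pv_row_eq (r : List Int) (h : r.length = 2) : r = [pvG0 r, pvG1 r] := by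
  match r, h with
  | [a, b], _ => simp [pvG0_pair, pvG1_pair]

lemma pv_emb_pi (s : List (List Int)) (h : ∀ r ∈ s, r.length = 2) : pvEmb (pvPi s) = s := by
  induction s with
  | nil => rfl
  | cons r t ih =>
      have hr := pv_row_eq r (h r (by simp))
      simp only [pvEmb, pvPi, List.map_cons] at *
      rw [← hr]
      exact congrArg _ (ih (fun x hx => h x (by simp [hx])))

lemma pv_normalizeA_emb (l : List (Int × Int)) : normalizeA (pvEmb l) = pvEmb (pvNormP l) := by
  unfold normalizeA pvNormP
  rw [pv_emb_sorted2]
  cases hS : pvSortP l with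
  | nil => rfl
  | cons p t =>
      simp only [pvEmb, List.map_cons, List.headI]
      have hget : PySem.List.pyGetD ([p.1, p.2] :: t.map (fun q => [q.1, q.2])) 0 [] = [p.1, p.2] := by
        simp [PySem.List.pyGetD, PySem.List.pyGet?, PySem.List.pyIdx?]
      rw [hget]
      simp [List.map_map, Function.comp, pvG0_pair, pvG1_pair]

lemma pv_rowrot (l : List (Int × Int)) :
    (pvEmb l).map (fun r => [pvG1 r, -(pvG0 r)]) = pvEmb (l.map pvRotP) := by
  simp [pvEmb, List.map_map, Function.comp, pvG0_pair, pvG1_pair, pvRotP]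

lemma pv_rotateA_emb (l : List (Int × Int)) : rotateA (pvEmb l) = pvEmb (pvStepP l) := by
  unfold rotateA pvStepP
  rw [pv_rowrot, pv_normalizeA_emb]

lemma pv_stepB_emb (l : List (Int × Int)) : stepB (pvEmb l) = pvEmb (pvStepP l) := by
  show normalizeA ((pvEmb l).map (fun r => [pvG1 r, -(pvG0 r)])) = _
  rw [pv_rowrot, pv_normalizeA_emb]
  rfl

-- the sort at pair level
lemma pv_sortP_perm (l : List (Int × Int)) : (pvSortP l).Perm l :=
  PySem.List.sorted_perm l pvKey false

lemma pv_sortP_pairwise (l : List (Int × Int)) :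
    List.Pairwise (fun a b => pvKey a ≤ pvKey b) (pvSortP l) :=
  PySem.List.sorted_pairwise l pvKey

lemma pv_key_inj : Function.Injective pvKey := toLex.injective

lemma pv_sortP_of_perm (l l' : List (Int × Int)) (h : l.Perm l') : pvSortP l = pvSortP l' :=
  PySem.List.sorted_eq_sorted_of_perm l l' pvKey pv_key_inj h

lemma pv_pairwise_uniq (l m : List (Int × Int)) (hp : l.Perm m)
    (h1 : List.Pairwise (fun a b => pvKey a ≤ pvKey b) l)
    (h2 : List.Pairwise (fun a b => pvKey a ≤ pvKey b) m) : l = m :=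
  List.eq_of_perm_of_sorted (fun a b _ _ hab hba => pv_key_inj (le_antisymm hab hba)) h1 h2 hp

lemma pv_tr_mono (u v : Int) (a b : Int × Int) (h : pvKey a ≤ pvKey b) :
    pvKey (pvTr u v a) ≤ pvKey (pvTr u v b) := by
  simp only [pvKey, pvTr, Prod.Lex.le_iff, ofLex_toLex] at *
  omega

lemma pv_sortP_tr (u v : Int) (l : List (Int × Int)) :
    pvSortP (l.map (pvTr u v)) = (pvSortP l).map (pvTr u v) := by
  apply pv_pairwise_uniq
  · exact (pv_sortP_perm _).trans ((pv_sortP_perm l).map (pvTr u v)).symm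
  · exact pv_sortP_pairwise _
  · exact (pv_sortP_pairwise l).map _ (pv_tr_mono u v)

lemma pv_normP_of_perm (l l' : List (Int × Int)) (h : l.Perm l') : pvNormP l = pvNormP l' := by
  unfold pvNormP
  rw [pv_sortP_of_perm l l' h]

lemma pv_normP_tr (u v : Int) (l : List (Int × Int)) :
    pvNormP (l.map (pvTr u v)) = pvNormP l := by
  unfold pvNormP
  rw [pv_sortP_tr]
  cases hS : pvSortP l with
  | nil => rfl
  | cons p t =>
      simp only [List.map_cons, List.headI, List.map_map]
      refine congrArg₂ List.cons ?_ ?_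
      · simp [pvTr]
      · apply List.map_congr_left
        intro q _
        simp [pvTr]

lemma pv_stepP_of_perm (l l' : List (Int × Int)) (h : l.Perm l') : pvStepP l = pvStepP l' :=
  pv_normP_of_perm _ _ (h.map pvRotP)

lemma pv_normP_eq_map (l : List (Int × Int)) :
    pvNormP l = (pvSortP l).map (pvTr (-(pvSortP l).headI.1) (-(pvSortP l).headI.2)) := by
  unfold pvNormP
  apply List.map_congr_left
  intro q _
  simp [pvTr]
  omega

lemma pv_stepP_normP (l : List (Int × Int)) : pvStepP (pvNormP l) = pvStepP l := by
  show pvNormP _ = pvNormP _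
  rw [pv_normP_eq_map l]
  have h1 : ((pvSortP l).map (pvTr (-(pvSortP l).headI.1) (-(pvSortP l).headI.2))).map pvRotP
      = (((pvSortP l).map pvRotP).map (pvTr (-(pvSortP l).headI.2) ((pvSortP l).headI.1))) := by
    simp only [List.map_map]
    apply List.map_congr_left
    intro q _
    simp [pvTr, pvRotP]
    omega
  rw [h1, pv_normP_tr]
  exact pv_normP_of_perm _ _ ((pv_sortP_perm l).map pvRotP)

lemma pv_stepP_map_rot (l : List (Int × Int)) :
    pvStepP (pvNormP (l.map pvRotP)) = pvNormP ((l.map pvRotP).map pvRotP) := by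
  rw [pv_stepP_normP]
  rfl

lemma pv_stepP4 (l : List (Int × Int)) :
    pvStepP (pvStepP (pvStepP (pvStepP l))) = pvNormP l := by
  show pvStepP (pvStepP (pvStepP (pvNormP (l.map pvRotP)))) = pvNormP l
  rw [pv_stepP_map_rot]
  rw [pv_stepP_map_rot]
  rw [pv_stepP_map_rot]
  simp only [List.map_map]
  have : (pvRotP ∘ pvRotP ∘ pvRotP ∘ pvRotP) = id := by
    funext p
    simp [pvRotP]
  rw [this, List.map_id]

-- the fold computing Python's min over a nonempty list
lemma pv_fmin_mem (x : List (List Int)) (l : List (List (List Int))) :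
    l.foldl (fun a b => if b < a then b else a) x ∈ x :: l := by
  induction l generalizing x with
  | nil => simp
  | cons b t ih =>
      simp only [List.foldl_cons]
      rcases List.mem_cons.1 (ih (if b < x then b else x)) with h | h
      · rw [h]; split <;> simp
      · simp [h]

lemma pv_fmin_le (x : List (List Int)) (l : List (List (List Int))) :
    ∀ y ∈ x :: l, l.foldl (fun a b => if b < a then b else a) x ≤ y := by
  induction l generalizing x with
  | nil => intro y hy; simp at hy; simp [hy]
  | cons b t ih =>
      intro y hy
      simp only [List.foldl_cons]
      have hx : (if b < x then b else x) ≤ x := by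
        split
        · exact le_of_lt (by assumption)
        · exact le_refl x
      have hbb : (if b < x then b else x) ≤ b := by
        split
        · exact le_refl b
        · exact not_lt.1 (by assumption)
      have hmin : t.foldl (fun a b => if b < a then b else a) (if b < x then b else x) ≤ (if b < x then b else x) :=
        ih _ _ (by simp)
      rcases List.mem_cons.1 hy with rfl | hy'
      · exact le_trans hmin hx
      · rcases List.mem_cons.1 hy' with rfl | hy''
        · exact le_trans hmin hbb
        · exact ih _ y (by simp [hy''])

lemma pv_fmin_congr (x y : List (List Int)) (l m : List (List (List Int)))
    (h : ∀ z, z ∈ x :: l ↔ z ∈ y :: m) :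
    l.foldl (fun a b => if b < a then b else a) x = m.foldl (fun a b => if b < a then b else a) y := by
  apply le_antisymm
  · exact pv_fmin_le x l _ ((h _).2 (pv_fmin_mem y m))
  · exact pv_fmin_le y m _ ((h _).1 (pv_fmin_mem x l))

lemma pv_canonB_emb (x : List (Int × Int)) :
    canonicalB (pvEmb x)
      = [pvEmb (pvStepP (pvStepP x)), pvEmb (pvStepP (pvStepP (pvStepP x))),
         pvEmb (pvStepP (pvStepP (pvStepP (pvStepP x))))].foldl
          (fun a b => if b < a then b else a) (pvEmb (pvStepP x)) := by
  show (match canonLoop 4 (pvEmb x) [] with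
        | [] => []
        | f :: fs => fs.foldl (fun a b => if b < a then b else a) f) = _
  have h : canonLoop 4 (pvEmb x) []
      = [pvEmb (pvStepP x), pvEmb (pvStepP (pvStepP x)), pvEmb (pvStepP (pvStepP (pvStepP x))),
         pvEmb (pvStepP (pvStepP (pvStepP (pvStepP x))))] := by
    simp [canonLoop, pv_stepB_emb]
  rw [h]

lemma pv_normP_head (l : List (Int × Int)) : (pvNormP l).headI = (0, 0) ∨ pvNormP l = [] := by
  rw [pv_normP_eq_map l]
  cases hT : pvSortP l with
  | nil => right; rfl
  | cons q u =>
      left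
      simp [pvTr]

lemma pv_normP_idem (l : List (Int × Int)) : pvNormP (pvNormP l) = pvNormP l := by
  have hpw : List.Pairwise (fun a b => pvKey a ≤ pvKey b) (pvNormP l) := by
    rw [pv_normP_eq_map l]
    exact (pv_sortP_pairwise l).map _ (pv_tr_mono _ _)
  have hself : pvSortP (pvNormP l) = pvNormP l :=
    PySem.List.sorted_eq_self_of_pairwise _ _ hpw
  rw [pv_normP_eq_map (pvNormP l), hself]
  rcases pv_normP_head l with h | h
  · rw [h]
    have h00 : pvTr (-(((0 : Int), (0 : Int)).1)) (-(((0 : Int), (0 : Int)).2)) = id := by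
      funext q
      simp [pvTr]
    rw [h00, List.map_id]
  · rw [h]
    rfl

lemma pv_stepP5 (l : List (Int × Int)) :
    pvStepP (pvStepP (pvStepP (pvStepP (pvStepP l)))) = pvStepP l := by
  rw [pv_stepP4 (pvStepP l)]
  show pvNormP (pvNormP (List.map pvRotP l)) = pvStepP l
  rw [pv_normP_idem]
  rfl

-- characterization of port A on embedded shapes
lemma pv_checkA (pb pc : List (Int × Int)) (used : List Int) :
    check (pvEmb pb) (pvEmb pc) used
      = decide (pvStepP pb = pvNormP pc
          ∨ pvStepP (pvStepP pb) = pvNormP pc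
          ∨ pvStepP (pvStepP (pvStepP pb)) = pvNormP pc
          ∨ pvStepP (pvStepP (pvStepP (pvStepP pb))) = pvNormP pc) := by
  simp only [check, checkLoop, pv_rotateA_emb, pv_normalizeA_emb, pv_emb_eq_iff]
  split_ifs <;> simp_all

-- characterization of port B on embedded shapes
lemma pv_checkB (pb pc : List (Int × Int)) (used : List Int) :
    check_alt (pvEmb pb) (pvEmb pc) used
      = decide
          ([pvEmb (pvStepP (pvStepP pb)), pvEmb (pvStepP (pvStepP (pvStepP pb))),
            pvEmb (pvStepP (pvStepP (pvStepP (pvStepP pb))))].foldl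
              (fun a b => if b < a then b else a) (pvEmb (pvStepP pb))
          = [pvEmb (pvStepP (pvStepP pc)), pvEmb (pvStepP (pvStepP (pvStepP pc))),
             pvEmb (pvStepP (pvStepP (pvStepP (pvStepP pc))))].foldl
              (fun a b => if b < a then b else a) (pvEmb (pvStepP pc))) := by
  show decide (canonicalB (pvEmb pb) = canonicalB (PySem.List.sorted2 (pvEmb pc) pvG0 pvG1)) = _
  rw [pv_emb_sorted2, pv_canonB_emb, pv_canonB_emb,
      pv_stepP_of_perm (pvSortP pc) pc (pv_sortP_perm pc)]

-- the combinatorial core: membership of cb's normal form among block's four rotations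
-- is the same as equality of the two lexicographic minima
lemma pv_core (e1 e2 e3 e4 f1 f2 f3 f4 N : List (Int × Int))
    (he2 : e2 = pvStepP e1) (he3 : e3 = pvStepP e2) (he4 : e4 = pvStepP e3)
    (hf2 : f2 = pvStepP f1) (hf3 : f3 = pvStepP f2) (hf4 : f4 = pvStepP f3)
    (hcyc : pvStepP e4 = e1) (hf1 : pvStepP N = f1) (hN4 : f4 = N) :
    ((e1 = N ∨ e2 = N ∨ e3 = N ∨ e4 = N) ↔
      ([pvEmb e2, pvEmb e3, pvEmb e4].foldl (fun a b => if b < a then b else a) (pvEmb e1)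
        = [pvEmb f2, pvEmb f3, pvEmb f4].foldl (fun a b => if b < a then b else a) (pvEmb f1))) := by
  constructor
  · rintro (h | h | h | h)
    · have a1 : f1 = e2 := by rw [← hf1, ← h, he2]
      have a2 : f2 = e3 := by rw [hf2, a1, he3]
      have a3 : f3 = e4 := by rw [hf3, a2, he4]
      have a4 : f4 = e1 := by rw [hf4, a3, hcyc]
      rw [a1, a2, a3, a4]
      apply pv_fmin_congr
      intro z
      simp only [List.mem_cons, List.not_mem_nil, or_false]
      tauto
    · have a1 : f1 = e3 := by rw [← hf1, ← h, he3]
      have a2 : f2 = e4 := by rw [hf2, a1, he4]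
      have a3 : f3 = e1 := by rw [hf3, a2, hcyc]
      have a4 : f4 = e2 := by rw [hf4, a3, he2]
      rw [a1, a2, a3, a4]
      apply pv_fmin_congr
      intro z
      simp only [List.mem_cons, List.not_mem_nil, or_false]
      tauto
    · have a1 : f1 = e4 := by rw [← hf1, ← h, he4]
      have a2 : f2 = e1 := by rw [hf2, a1, hcyc]
      have a3 : f3 = e2 := by rw [hf3, a2, he2]
      have a4 : f4 = e3 := by rw [hf4, a3, he3]
      rw [a1, a2, a3, a4]
      apply pv_fmin_congr
      intro z
      simp only [List.mem_cons, List.not_mem_nil, or_false]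
      tauto
    · have a1 : f1 = e1 := by rw [← hf1, ← h, hcyc]
      have a2 : f2 = e2 := by rw [hf2, a1, he2]
      have a3 : f3 = e3 := by rw [hf3, a2, he3]
      have a4 : f4 = e4 := by rw [hf4, a3, he4]
      rw [a1, a2, a3, a4]
  · intro h
    have hstep : ∀ x, (x = e1 ∨ x = e2 ∨ x = e3 ∨ x = e4) →
        (pvStepP x = e1 ∨ pvStepP x = e2 ∨ pvStepP x = e3 ∨ pvStepP x = e4) := by
      rintro x (rfl | rfl | rfl | rfl)
      · exact Or.inr (Or.inl he2.symm)
      · exact Or.inr (Or.inr (Or.inl he3.symm))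
      · exact Or.inr (Or.inr (Or.inr he4.symm))
      · exact Or.inl hcyc
    have hmE := pv_fmin_mem (pvEmb e1) [pvEmb e2, pvEmb e3, pvEmb e4]
    have hmF := pv_fmin_mem (pvEmb f1) [pvEmb f2, pvEmb f3, pvEmb f4]
    rw [← h] at hmF
    simp only [List.mem_cons, List.not_mem_nil, or_false] at hmE hmF
    -- the common minimum, read on each side
    rcases hmF with hF | hF | hF | hF
    · -- minimum is f1
      have hPi : f1 = e1 ∨ f1 = e2 ∨ f1 = e3 ∨ f1 = e4 := by
        rcases hmE with h' | h' | h' | h' <;> rw [hF] at h' <;>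
          simp only [pv_emb_eq_iff] at h' <;> tauto
      have hNeq : N = pvStepP (pvStepP (pvStepP f1)) := by rw [← hN4, hf4, hf3, hf2]
      rw [hNeq]
      rcases hstep _ (hstep _ (hstep _ hPi)) with h' | h' | h' | h'
      · exact Or.inl h'.symm
      · exact Or.inr (Or.inl h'.symm)
      · exact Or.inr (Or.inr (Or.inl h'.symm))
      · exact Or.inr (Or.inr (Or.inr h'.symm))
    · -- minimum is f2
      have hPi : f2 = e1 ∨ f2 = e2 ∨ f2 = e3 ∨ f2 = e4 := by
        rcases hmE with h' | h' | h' | h' <;> rw [hF] at h' <;>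
          simp only [pv_emb_eq_iff] at h' <;> tauto
      have hNeq : N = pvStepP (pvStepP f2) := by rw [← hN4, hf4, hf3]
      rw [hNeq]
      rcases hstep _ (hstep _ hPi) with h' | h' | h' | h'
      · exact Or.inl h'.symm
      · exact Or.inr (Or.inl h'.symm)
      · exact Or.inr (Or.inr (Or.inl h'.symm))
      · exact Or.inr (Or.inr (Or.inr h'.symm))
    · -- minimum is f3
      have hPi : f3 = e1 ∨ f3 = e2 ∨ f3 = e3 ∨ f3 = e4 := by
        rcases hmE with h' | h' | h' | h' <;> rw [hF] at h' <;>
          simp only [pv_emb_eq_iff] at h' <;> tauto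
      have hNeq : N = pvStepP f3 := by rw [← hN4, hf4]
      rw [hNeq]
      rcases hstep _ hPi with h' | h' | h' | h'
      · exact Or.inl h'.symm
      · exact Or.inr (Or.inl h'.symm)
      · exact Or.inr (Or.inr (Or.inl h'.symm))
      · exact Or.inr (Or.inr (Or.inr h'.symm))
    · -- minimum is f4
      have hPi : f4 = e1 ∨ f4 = e2 ∨ f4 = e3 ∨ f4 = e4 := by
        rcases hmE with h' | h' | h' | h' <;> rw [hF] at h' <;>
          simp only [pv_emb_eq_iff] at h' <;> tauto
      rw [← hN4]
      rcases hPi with h' | h' | h' | h'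
      · exact Or.inl h'.symm
      · exact Or.inr (Or.inl h'.symm)
      · exact Or.inr (Or.inr (Or.inl h'.symm))
      · exact Or.inr (Or.inr (Or.inr h'.symm))

theorem pv_main (block cb : List (List Int)) (used : List Int)
    (hpre : Pre_check block cb used) : check block cb used = check_alt block cb used := by
  obtain ⟨hb0, hc0, hbl, hcl⟩ := hpre
  rw [← pv_emb_pi block hbl, ← pv_emb_pi cb hcl, pv_checkA, pv_checkB, decide_eq_decide]
  exact pv_core _ _ _ _ _ _ _ _ _ rfl rfl rfl rfl rfl rfl
    (pv_stepP5 (pvPi block)) (pv_stepP_normP (pvPi cb)) (pv_stepP4 (pvPi cb))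

-- ===== VERDICT (by name: the statement is the Claim_ definition above) =====
theorem check_spec : Claim_equal_check := by
  intro block cb used _ hpre
  unfold Spec_check
  exact pv_main block cb used hpre
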